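-- pv_equiv track=rewrite | github.com/thanhbinh1104/thanhbinh-python | python.py | first_repeated_char_min_index
-- ===== SOURCE A (Python) =====
-- def first_repeated_char_min_index(s):
--     first_index = {}
--     min_index = len(s)
--     result_char = None
--     for i, ch in enumerate(s):
--         if ch in first_index:
--             if first_index[ch] < min_index:
--                 min_index = first_index[ch]
--                 result_char = ch
--         else:
--             first_index[ch] = i
--     return result_char
-- ===== SOURCE B (Python) =====
-- def first_repeated_char_min_index(s):
--     counts = {}
--     for c in s:
--         counts[c] = counts.get(c, 0) + 1
--     for c in s:
--         if counts[c] > 1: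
--             return c
--     return None
-- ===== Notes on version B (the rewrite author's own statement) =====
-- stated objective: simpler
-- what changed: Instead of tracking first-occurrence indices plus a running minimum and result, B counts all occurrences in one pass and then returns the first character (in left-to-right scan) whose count exceeds 1, which is exactly the repeated char with minimal first index.
import Mathlib
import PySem

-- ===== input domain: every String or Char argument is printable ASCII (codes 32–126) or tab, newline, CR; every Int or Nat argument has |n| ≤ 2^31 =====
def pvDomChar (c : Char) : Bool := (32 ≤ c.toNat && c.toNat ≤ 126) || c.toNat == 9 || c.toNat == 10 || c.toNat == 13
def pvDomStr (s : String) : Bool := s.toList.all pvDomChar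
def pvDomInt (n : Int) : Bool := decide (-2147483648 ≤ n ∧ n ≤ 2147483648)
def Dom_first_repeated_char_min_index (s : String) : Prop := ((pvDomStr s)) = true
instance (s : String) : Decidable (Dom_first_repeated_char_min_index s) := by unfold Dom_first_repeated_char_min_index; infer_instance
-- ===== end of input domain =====

-- B replaces A's first-index dict plus running minimum by a count dict and a second
-- left-to-right scan returning the first character with count > 1 (objective: simpler).

-- ===== PORT A =====
-- loop body of A's for-loop; first_index[ch] is read as getD _ 0, only reached under `contains` (so never the default)
def pvAStep (st : PySem.Dict Char Int × Int × Option String) (p : Int × Char) :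
    PySem.Dict Char Int × Int × Option String :=
  if st.1.contains p.2 then
    if st.1.getD p.2 0 < st.2.1 then (st.1, st.1.getD p.2 0, some (String.ofList [p.2]))
    else st
  else (st.1.insert p.2 p.1, st.2.1, st.2.2)

def first_repeated_char_min_index (s : String) : Option String :=
  let st := (PySem.List.enumerate s.toList).foldl pvAStep
      (PySem.Dict.empty, PySem.Str.len s, none)
  st.2.2

-- ===== PORT B =====
-- first pass: counts[c] = counts.get(c, 0) + 1
def pvBCount (l : List Char) : PySem.Dict Char Int :=
  l.foldl (fun d c => d.insert c (d.getD c 0 + 1)) PySem.Dict.empty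

-- second pass: return the first c with counts[c] > 1
def pvBScan (counts : PySem.Dict Char Int) : List Char → Option String
  | [] => none
  | c :: t => if 1 < counts.getD c 0 then some (String.ofList [c]) else pvBScan counts t

def first_repeated_char_min_index_alt (s : String) : Option String :=
  pvBScan (pvBCount s.toList) s.toList

-- ===== PRECONDITION & SPEC =====
def Spec_first_repeated_char_min_index (s : String) (out : Option String) : Prop := out = first_repeated_char_min_index_alt s
instance (s : String) (out : Option String) : Decidable (Spec_first_repeated_char_min_index s out) := by unfold Spec_first_repeated_char_min_index; infer_instance

-- ===== CLAIM (what is proved, stated in full; the proofs are below) =====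
def Claim_equal_first_repeated_char_min_index : Prop := ∀ (s : String), Dom_first_repeated_char_min_index s → Spec_first_repeated_char_min_index s (first_repeated_char_min_index s)

-- ===== LEMMAS AND PROOFS =====

-- the common specification: the first character (scanning left to right) occurring at least twice
def pvFirstRep (l : List Char) : Option Char := l.find? (fun c => decide (2 ≤ l.count c))

-- B computes pvFirstRep
theorem pvBScan_eq (l rest : List Char) :
    pvBScan (pvBCount l) rest
      = (rest.find? (fun c => decide (2 ≤ l.count c))).map (fun c => String.ofList [c]) := by
  induction rest with
  | nil => rfl
  | cons c t ih =>
    have hc : (pvBCount l).getD c 0 = (l.count c : Int) := by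
      simpa [pvBCount] using PySem.Dict.getD_foldl_insert_add_one l PySem.Dict.empty c
    by_cases h : 2 ≤ l.count c
    · have h1 : (1 : Int) < (l.count c : Int) := by exact_mod_cast h
      simp [pvBScan, hc, h, h1]
    · have h1 : ¬ (1 : Int) < (l.count c : Int) := by exact_mod_cast h
      simp [pvBScan, hc, h, h1, ih]

theorem pvFind_congr (l : List Char) (p q : Char → Bool) (h : ∀ x ∈ l, p x = q x) :
    l.find? p = l.find? q := by
  induction l with
  | nil => rfl
  | cons x t ih =>
    have hx := h x (by simp)
    rw [List.find?_cons, List.find?_cons, hx, ih (fun y hy => h y (by simp [hy]))]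

-- find? with an "or this element" predicate, when nothing satisfies the base predicate
theorem pvFind_or_none (l : List Char) (P : Char → Bool) (a : Char)
    (ha : a ∈ l) (h : l.find? P = none) :
    l.find? (fun x => P x || (x == a)) = some a := by
  induction l with
  | nil => cases ha
  | cons x t ih =>
    have hx : P x = false := by
      have := List.find?_eq_none.mp h x (by simp)
      simpa using this
    by_cases hxa : x = a
    · subst hxa; simp [hx]
    · have hat : a ∈ t := by
        rcases ha with _ | hat
        · exact absurd rfl hxa
        · assumption
      have ht : t.find? P = none := by
        rw [List.find?_cons_of_neg (by simp [hx])] at h; exact h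
      simp [hx, hxa, ih hat ht]

-- find? with an "or this element" predicate, when c is the first base hit
theorem pvFind_or_some (l : List Char) (P : Char → Bool) (a c : Char)
    (ha : a ∈ l) (hc : l.find? P = some c) :
    l.find? (fun x => P x || (x == a))
      = some (if l.idxOf a < l.idxOf c then a else c) := by
  induction l with
  | nil => cases ha
  | cons x t ih =>
    have hPc : P c = true := List.find?_some hc
    by_cases hx : P x = true
    · have hcx : c = x := by
        rw [List.find?_cons_of_pos hx] at hc; exact (Option.some.inj hc).symm
      subst hcx
      simp [hx, List.idxOf_cons_self]
    · have hx' : P x = false := by simpa using hx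
      have hcx : x ≠ c := fun h => by rw [← h] at hPc; simp [hPc] at hx'
      have ht : t.find? P = some c := by
        rw [List.find?_cons_of_neg (by simp [hx'])] at hc; exact hc
      by_cases hxa : x = a
      · subst hxa
        have hcpos : (x :: t).idxOf c = t.idxOf c + 1 := List.idxOf_cons_ne t hcx
        simp [hx', List.idxOf_cons_self, hcpos]
      · have hat : a ∈ t := by
          rcases ha with _ | hat
          · exact absurd rfl hxa
          · assumption
        have hxa' : (x == a) = false := by simp [hxa]
        simp only [List.find?_cons, hx', hxa', Bool.or_false]
        rw [ih hat ht]
        rw [List.idxOf_cons_ne t hxa, List.idxOf_cons_ne t hcx]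
        simp

-- appending a fresh character does not change the first repeated character
theorem pvFirstRep_snoc_not_mem (p : List Char) (a : Char) (h : a ∉ p) :
    pvFirstRep (p ++ [a]) = pvFirstRep p := by
  have hca : (p ++ [a]).count a = 1 := by
    rw [List.count_append, List.count_eq_zero.mpr h, List.count_singleton]
    simp
  unfold pvFirstRep
  rw [List.find?_append]
  have h2 : [a].find? (fun c => decide (2 ≤ (p ++ [a]).count c)) = none := by
    rw [List.find?_cons_of_neg (by simp [hca])]
    rfl
  have h1 : p.find? (fun c => decide (2 ≤ (p ++ [a]).count c))
      = p.find? (fun c => decide (2 ≤ p.count c)) := by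
    apply pvFind_congr
    intro x hx
    have hxa : (a == x) = false := by
      simp only [beq_eq_false_iff_ne, ne_eq]
      exact fun he => h (he ▸ hx)
    rw [List.count_append, List.count_singleton, hxa]
    simp
  rw [h1, h2]
  cases p.find? (fun c => decide (2 ≤ p.count c)) <;> rfl

-- appending a character already present: the new first repeated char
theorem pvFirstRep_snoc_mem (p : List Char) (a : Char) (h : a ∈ p) :
    pvFirstRep (p ++ [a])
      = match pvFirstRep p with
        | none => some a
        | some c => some (if p.idxOf a < p.idxOf c then a else c) := by
  have hpt : ∀ x, decide (2 ≤ (p ++ [a]).count x)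
      = ((fun c => decide (2 ≤ p.count c)) x || (x == a)) := by
    intro x
    rcases eq_or_ne x a with rfl | hxa
    · have h1 : 1 ≤ p.count x := List.one_le_count_iff.mpr h
      have h2 : 2 ≤ (p ++ [x]).count x := by
        rw [List.count_append, List.count_singleton]
        simp; omega
      simp [h]
    · have hxa' : (a == x) = false := by simp [Ne.symm hxa]
      have hcnt : (p ++ [a]).count x = p.count x := by
        rw [List.count_append, List.count_singleton, hxa']
        simp
      simp [hcnt, hxa]
  unfold pvFirstRep
  have hfx : (p ++ [a]).find? (fun c => decide (2 ≤ (p ++ [a]).count c))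
      = (p ++ [a]).find? (fun x => decide (2 ≤ p.count x) || (x == a)) :=
    pvFind_congr _ _ _ (fun x _ => hpt x)
  rw [hfx, List.find?_append]
  cases hF : p.find? (fun c => decide (2 ≤ p.count c)) with
  | none => rw [pvFind_or_none p _ a h hF]; rfl
  | some c => rw [pvFind_or_some p _ a c h hF]; rfl

-- A's loop invariant: after processing the prefix p (of a string of length n),
-- the dict holds each seen char's first index, and (min_index, result_char)
-- describe the first repeated character of p (or (n, none))
def pvInv (p : List Char) (n : Int) (st : PySem.Dict Char Int × Int × Option String) : Prop :=
  (∀ c : Char, st.1.get? c = if c ∈ p then some ((p.idxOf c : Int)) else none) ∧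
  (match pvFirstRep p with
   | none => st.2.1 = n ∧ st.2.2 = none
   | some c => st.2.1 = ((p.idxOf c : Int)) ∧ st.2.2 = some (String.ofList [c]))

theorem pvStep_preserve (p : List Char) (a : Char) (n : Int)
    (st : PySem.Dict Char Int × Int × Option String)
    (hlen : (p.length : Int) < n) (h : pvInv p n st) :
    pvInv (p ++ [a]) n (pvAStep st ((p.length : Int), a)) := by
  obtain ⟨hA, hB⟩ := h
  have hcont : st.1.contains a = decide (a ∈ p) := by
    rw [PySem.Dict.contains_eq_isSome_get?, hA a]
    by_cases hm : a ∈ p <;> simp [hm]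
  by_cases hmem : a ∈ p
  · -- seen before: dict unchanged
    have hct : st.1.contains a = true := by rw [hcont]; simp [hmem]
    have hget : st.1.getD a 0 = (p.idxOf a : Int) := by
      rw [PySem.Dict.getD_eq_get?_getD, hA a, if_pos hmem]; rfl
    have hdict : ∀ c : Char, st.1.get? c
        = if c ∈ p ++ [a] then some (((p ++ [a]).idxOf c : Int)) else none := by
      intro c
      by_cases hc : c ∈ p
      · rw [hA c, if_pos hc, if_pos (by simp [hc]), List.idxOf_append_of_mem hc]
      · have hcm : c ∉ p ++ [a] := by
          simp only [List.mem_append, List.mem_singleton]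
          rintro (h1 | rfl)
          · exact hc h1
          · exact hc hmem
        rw [hA c, if_neg hc, if_neg hcm]
    cases hF : pvFirstRep p with
    | none =>
      obtain ⟨hm, hr⟩ := by rw [hF] at hB; exact hB
      have hidx : st.1.getD a 0 < st.2.1 := by
        rw [hget, hm]
        have h1 := List.idxOf_lt_length_of_mem hmem
        have h2 : (p.idxOf a : Int) < (p.length : Int) := by exact_mod_cast h1
        omega
      have hsteq : pvAStep st ((p.length : Int), a)
          = (st.1, st.1.getD a 0, some (String.ofList [a])) := by
        simp [pvAStep, hct, hidx]
      rw [hsteq]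
      refine ⟨hdict, ?_⟩
      rw [pvFirstRep_snoc_mem p a hmem, hF]
      exact ⟨by rw [hget, List.idxOf_append_of_mem hmem], by trivial⟩
    | some c =>
      obtain ⟨hm, hr⟩ := by rw [hF] at hB; exact hB
      have hcp : c ∈ p := List.mem_of_find?_eq_some hF
      by_cases hlt : p.idxOf a < p.idxOf c
      · have hlt' : st.1.getD a 0 < st.2.1 := by
          rw [hget, hm]; exact_mod_cast hlt
        have hsteq : pvAStep st ((p.length : Int), a)
            = (st.1, st.1.getD a 0, some (String.ofList [a])) := by
          simp [pvAStep, hct, hlt']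
        rw [hsteq]
        refine ⟨hdict, ?_⟩
        rw [pvFirstRep_snoc_mem p a hmem, hF]
        simp only [hlt, if_true]
        exact ⟨by rw [hget, List.idxOf_append_of_mem hmem], by trivial⟩
      · have hlt' : ¬ st.1.getD a 0 < st.2.1 := by
          rw [hget, hm]
          intro hcon
          exact hlt (by exact_mod_cast hcon)
        have hsteq : pvAStep st ((p.length : Int), a) = st := by
          simp [pvAStep, hct, hlt']
        rw [hsteq]
        refine ⟨hdict, ?_⟩
        rw [pvFirstRep_snoc_mem p a hmem, hF]
        simp only [hlt, if_false]
        exact ⟨by rw [hm, List.idxOf_append_of_mem hcp], hr⟩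
  · -- fresh char: insert its index
    have hcf : st.1.contains a = false := by rw [hcont]; simp [hmem]
    have hsteq : pvAStep st ((p.length : Int), a)
        = (st.1.insert a (p.length : Int), st.2.1, st.2.2) := by
      simp [pvAStep, hcf]
    rw [hsteq]
    refine ⟨?_, ?_⟩
    · intro c
      rw [PySem.Dict.get?_insert]
      by_cases hca : c = a
      · subst hca
        rw [if_pos rfl, if_pos (by simp)]
        have hidx : (p ++ [c]).idxOf c = p.length := by simp [List.idxOf_append, hmem]
        rw [hidx]
      · rw [if_neg hca, hA c]
        by_cases hc : c ∈ p
        · rw [if_pos hc, if_pos (by simp [hc]), List.idxOf_append_of_mem hc]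
        · rw [if_neg hc, if_neg (by simp [hc, hca])]
    · rw [pvFirstRep_snoc_not_mem p a hmem]
      cases hF : pvFirstRep p with
      | none => exact (by rw [hF] at hB; exact hB)
      | some c =>
        obtain ⟨hm, hr⟩ := by rw [hF] at hB; exact hB
        have hcp : c ∈ p := List.mem_of_find?_eq_some hF
        exact ⟨by rw [hm, List.idxOf_append_of_mem hcp], hr⟩

theorem pvLoop (n : Int) (rest : List Char) : ∀ (p : List Char)
    (st : PySem.Dict Char Int × Int × Option String),
    (p.length : Int) + (rest.length : Int) = n → pvInv p n st →
    pvInv (p ++ rest) n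
      ((PySem.List.enumerate rest ((p.length : Int))).foldl pvAStep st) := by
  induction rest with
  | nil => intro p st _ h; simpa [PySem.List.enumerate_nil] using h
  | cons a t ih =>
    intro p st hn h
    rw [PySem.List.enumerate_cons, List.foldl_cons]
    have hn' : (p.length : Int) + (t.length : Int) + 1 = n := by
      rw [List.length_cons] at hn; push_cast at hn ⊢; omega
    have hlen : (p.length : Int) < n := by omega
    have hstep := pvStep_preserve p a n st hlen h
    have hlen2 : (((p ++ [a]).length : Nat) : Int) + (t.length : Int) = n := by
      rw [List.length_append]; push_cast; simp; omega
    have hres := ih (p ++ [a]) _ hlen2 hstep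
    have harr : (((p ++ [a]).length : Nat) : Int) = (p.length : Int) + 1 := by
      rw [List.length_append]; push_cast; simp
    rw [harr] at hres
    simpa [List.append_assoc] using hres

-- ===== VERDICT (by name: the statement is the Claim_ definition above) =====
theorem first_repeated_char_min_index_spec : Claim_equal_first_repeated_char_min_index := by
  intro s _
  unfold Spec_first_repeated_char_min_index
  unfold first_repeated_char_min_index first_repeated_char_min_index_alt
  set l := s.toList with hl
  have h0 : pvInv [] ((l.length : Int)) (PySem.Dict.empty, PySem.Str.len s, none) := by
    constructor
    · intro c; simp [PySem.Dict.get?_empty]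
    · simp only [pvFirstRep, List.find?_nil]
      exact ⟨by rw [PySem.Str.len_eq], by trivial⟩
  have hinv := pvLoop (l.length : Int) l [] _ (by simp) h0
  simp only [List.nil_append, List.length_nil, Nat.cast_zero] at hinv
  obtain ⟨-, hB⟩ := hinv
  rw [pvBScan_eq l l]
  cases hF : pvFirstRep l with
  | none =>
    obtain ⟨-, hr⟩ := by rw [hF] at hB; exact hB
    rw [hr]
    have hfind : l.find? (fun c => decide (2 ≤ l.count c)) = none := hF
    rw [hfind]; rfl
  | some c =>
    obtain ⟨-, hr⟩ := by rw [hF] at hB; exact hB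
    rw [hr]
    have hfind : l.find? (fun c => decide (2 ≤ l.count c)) = some c := hF
    rw [hfind]; rfl
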